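-- pv_equiv track=rewrite | github.com/Wonjin-Lee/algorithm-with-python-study | Greedy/large_number_rule.py | sum_large_number
-- ===== SOURCE A (Python) =====
-- def sum_large_number(number_list, m, k):
--     total = 0
--
--     # 리스트를 역으로 정렬하여 인덱스 0번과 1번 값만 사용한다. (가장 큰 값, 두 번째로 큰 값)
--     number_list = sorted(number_list, reverse=True)
--
--     while True:
--         # 가장 큰 값을 k번 더한다.
--         for _ in range(k):
--             total += number_list[0]
--             m -= 1
--
--             if m == 0:
--                 return total
--
--         # 두 번째로 큰 값을 1번 더한다.
--         total += number_list[1]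
--         m -= 1
--
--         if m == 0:
--             return total
-- ===== SOURCE B (Python) =====
-- def sum_large_number(number_list, m, k):
--     s = sorted(number_list, reverse=True)
--     a = s[0]
--     if m <= k:
--         return m * a
--     if k <= 0:
--         return m * s[1]
--     b = s[1]
--     q, r = divmod(m, k + 1)
--     return q * (k * a + b) + r * a
-- ===== Notes on version B (the rewrite author's own statement) =====
-- stated objective: alternative
-- what changed: B replaces A's one-addition-per-step while/for loop with closed-form cycle arithmetic: divmod(m, k+1) gives the number of full (k largest + 1 second-largest) cycles and the remainder, so the post-sort work is constant instead of m additions (the sort still dominates the measured time).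
import Mathlib
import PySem

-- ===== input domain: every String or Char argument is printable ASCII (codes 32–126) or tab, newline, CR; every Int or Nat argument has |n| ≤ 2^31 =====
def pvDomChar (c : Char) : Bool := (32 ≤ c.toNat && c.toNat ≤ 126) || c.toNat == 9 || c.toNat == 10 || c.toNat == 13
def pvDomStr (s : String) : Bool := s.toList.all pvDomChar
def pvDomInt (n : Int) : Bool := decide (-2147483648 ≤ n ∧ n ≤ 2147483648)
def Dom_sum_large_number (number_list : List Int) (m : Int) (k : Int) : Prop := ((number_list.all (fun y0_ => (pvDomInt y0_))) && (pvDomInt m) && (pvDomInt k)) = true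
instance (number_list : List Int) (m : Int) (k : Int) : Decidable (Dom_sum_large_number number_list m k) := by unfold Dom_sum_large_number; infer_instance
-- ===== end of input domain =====

-- B replaces A's add-one-at-a-time loop by closed-form cycle arithmetic: m // (k+1) full
-- (k largest + 1 second-largest) cycles plus a remainder of largest values.

-- ===== PORT A =====
-- the inner `for _ in range(k)` loop: .inl t = the function returned t, .inr (t, m) = loop finished
def pvInnerA (a : Int) : Nat → Int → Int → (Int ⊕ (Int × Int))
  | 0, total, m => .inr (total, m)
  | n+1, total, m =>
    let total := total + a
    let m := m - 1
    if m = 0 then .inl total else pvInnerA a n total m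

-- the `while True` loop; fuel = initial m.toNat (each pass shrinks m by ≥ 1, so inside
-- Pre_ the fuel is never exhausted; with m ≤ 0 the Python loops forever, outside Pre_)
def pvOuterA (a b : Int) (k : Nat) : Nat → Int → Int → Int
  | 0, total, _ => total
  | fuel+1, total, m =>
    match pvInnerA a k total m with
    | .inl t => t
    | .inr (t, m') =>
      let t := t + b
      let m'' := m' - 1
      if m'' = 0 then t else pvOuterA a b k fuel t m''

def sum_large_number (number_list : List Int) (m : Int) (k : Int) : Int :=
  let s := PySem.List.sorted number_list (fun x => x) true
  let a := (PySem.List.pyGet? s 0).getD 0   -- number_list[0]; in range inside Pre_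
  let b := (PySem.List.pyGet? s 1).getD 0   -- number_list[1]; in range whenever A reaches it, inside Pre_
  pvOuterA a b k.toNat m.toNat 0 m

-- ===== PORT B =====
def sum_large_number_alt (number_list : List Int) (m : Int) (k : Int) : Int :=
  let s := PySem.List.sorted number_list (fun x => x) true
  let a := (PySem.List.pyGet? s 0).getD 0
  if m ≤ k then m * a
  else if k ≤ 0 then m * ((PySem.List.pyGet? s 1).getD 0)
  else
    let b := (PySem.List.pyGet? s 1).getD 0
    let q := PySem.Int.floordiv m (k + 1)
    let r := PySem.Int.mod m (k + 1)
    q * (k * a + b) + r * a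

-- ===== PRECONDITION & SPEC =====
-- exactly where the Python A returns: with m ≤ 0 the while-loop never terminates, and the
-- list indexing ([0] always, [1] as soon as k < m) must be in range
def Pre_sum_large_number (number_list : List Int) (m : Int) (k : Int) : Prop :=
  1 ≤ m ∧ 1 ≤ number_list.length ∧ (m ≤ k ∨ 2 ≤ number_list.length)
instance (number_list : List Int) (m : Int) (k : Int) : Decidable (Pre_sum_large_number number_list m k) := by unfold Pre_sum_large_number; infer_instance

def pvWitness_sum_large_number : List Int × Int × Int := ([3, 1, 2], 7, 2)

def Spec_sum_large_number (number_list : List Int) (m : Int) (k : Int) (out : Int) : Prop := out = sum_large_number_alt number_list m k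
instance (number_list : List Int) (m : Int) (k : Int) (out : Int) : Decidable (Spec_sum_large_number number_list m k out) := by unfold Spec_sum_large_number; infer_instance

-- ===== CLAIM (what is proved, stated in full; the proofs are below) =====
def Claim_equal_sum_large_number : Prop := ∀ (number_list : List Int) (m : Int) (k : Int), Dom_sum_large_number number_list m k → Pre_sum_large_number number_list m k → Spec_sum_large_number number_list m k (sum_large_number number_list m k)

-- ===== LEMMAS AND PROOFS =====

-- closed form of one whole run, in terms of B's arithmetic
def pvF (a b m : Int) (k : Nat) : Int :=
  if m ≤ (k : Int) then m * a
  else PySem.Int.floordiv m ((k : Int) + 1) * ((k : Int) * a + b) + PySem.Int.mod m ((k : Int) + 1) * a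

theorem pvInnerA_spec (a : Int) (k : Nat) (total m : Int) (hm : 1 ≤ m) :
    pvInnerA a k total m =
      if m ≤ (k : Int) then .inl (total + m * a) else .inr (total + (k : Int) * a, m - k) := by
  induction k generalizing total m with
  | zero => simp [pvInnerA]; omega
  | succ n ih =>
    simp only [pvInnerA]
    by_cases h1 : m - 1 = 0
    · have : m = 1 := by omega
      subst this
      simp
  -- m ≥ 2
    · rw [if_neg h1, ih _ _ (by omega)]
      push_cast
      by_cases h2 : m - 1 ≤ (n : Int)
      · rw [if_pos h2, if_pos (by omega)]
        congr 1; ring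
      · rw [if_neg h2, if_neg (by omega)]
        simp only [Sum.inr.injEq, Prod.mk.injEq]
        exact ⟨by ring, by omega⟩

theorem pvF_step (a b m : Int) (k : Nat) (h1 : (k : Int) + 2 ≤ m) :
    pvF a b m k = (k : Int) * a + b + pvF a b (m - ((k : Int) + 1)) k := by
  have hd : (0 : Int) < (k : Int) + 1 := by positivity
  unfold pvF
  rw [if_neg (by omega), PySem.Int.floordiv_eq_ediv_of_pos hd, PySem.Int.mod_eq_emod_of_pos hd]
  by_cases h2 : m - ((k : Int) + 1) ≤ (k : Int)
  · -- q = 1, r = m - (k+1)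
    rw [if_pos h2]
    have hq : m / ((k : Int) + 1) = 1 := by
      rw [Int.ediv_eq_iff_of_pos hd] <;> constructor <;> omega
    have hr : m % ((k : Int) + 1) = m - ((k : Int) + 1) := by
      have := Int.emod_emod_of_dvd m (dvd_refl ((k : Int) + 1))
      have h := Int.ediv_add_emod m ((k : Int) + 1)
      rw [hq] at h; omega
    rw [hq, hr]; ring
  · rw [if_neg h2,
      PySem.Int.floordiv_eq_ediv_of_pos hd, PySem.Int.mod_eq_emod_of_pos hd]
    have hq : m / ((k : Int) + 1) = (m - ((k : Int) + 1)) / ((k : Int) + 1) + 1 := by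
      have h := Int.add_mul_ediv_right (m - ((k : Int) + 1)) 1 (show ((k : Int) + 1) ≠ 0 by omega)
      rw [one_mul] at h
      conv_lhs => rw [show m = m - ((k : Int) + 1) + ((k : Int) + 1) by ring]
      exact h
    have hr : m % ((k : Int) + 1) = (m - ((k : Int) + 1)) % ((k : Int) + 1) := by
      conv_lhs => rw [show m = m - ((k : Int) + 1) + 1 * ((k : Int) + 1) by ring]
      exact Int.add_mul_emod_self_right _ _ _
    rw [hq, hr]; ring

theorem pvOuterA_spec (a b : Int) (k : Nat) (fuel : Nat) (total m : Int)
    (hm : 1 ≤ m) (hf : m.toNat ≤ fuel) :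
    pvOuterA a b k fuel total m = total + pvF a b m k := by
  induction fuel generalizing total m with
  | zero => omega
  | succ fuel ih =>
    simp only [pvOuterA, pvInnerA_spec a k total m hm]
    by_cases h1 : m ≤ (k : Int)
    · rw [if_pos h1]; simp [pvF, if_pos h1]
    · rw [if_neg h1]
      simp only
      by_cases h2 : m - (k : Int) - 1 = 0
      · have hm' : m = (k : Int) + 1 := by omega
        rw [if_pos h2]
        have hd : (0 : Int) < (k : Int) + 1 := by positivity
        have hq : m / ((k : Int) + 1) = 1 := by
          rw [Int.ediv_eq_iff_of_pos hd] <;> constructor <;> omega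
        have hr : m % ((k : Int) + 1) = 0 := by
          have h := Int.ediv_add_emod m ((k : Int) + 1)
          rw [hq] at h; omega
        unfold pvF
        rw [if_neg h1, PySem.Int.floordiv_eq_ediv_of_pos hd, PySem.Int.mod_eq_emod_of_pos hd, hq, hr]
        ring
      · rw [if_neg h2, ih _ _ (by omega) (by omega)]
        rw [pvF_step a b m k (by omega)]
        ring_nf

theorem alt_eq_F (s : List Int) (m k : Int) (hm : 1 ≤ m) :
    sum_large_number_alt s m k =
      ((PySem.List.pyGet? (PySem.List.sorted s (fun x => x) true) 0).getD 0 : Int) * 0 +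
      pvF ((PySem.List.pyGet? (PySem.List.sorted s (fun x => x) true) 0).getD 0)
        ((PySem.List.pyGet? (PySem.List.sorted s (fun x => x) true) 1).getD 0) m k.toNat := by
  unfold sum_large_number_alt pvF
  set a := (PySem.List.pyGet? (PySem.List.sorted s (fun x => x) true) 0).getD 0 with ha
  set b := (PySem.List.pyGet? (PySem.List.sorted s (fun x => x) true) 1).getD 0 with hb
  simp only
  by_cases h1 : m ≤ k
  · rw [if_pos h1, if_pos (by omega : m ≤ (k.toNat : Int))]; ring
  · rw [if_neg h1]
    by_cases h2 : k ≤ 0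
    · -- k.toNat = 0 : the formula collapses to m * b
      rw [if_pos h2, if_neg (by omega : ¬ m ≤ (k.toNat : Int))]
      have hk0 : (k.toNat : Int) = 0 := by omega
      rw [hk0]
      have hq : PySem.Int.floordiv m 1 = m := by
        rw [PySem.Int.floordiv_eq_ediv_of_pos (by omega)]; simp
      have hr : PySem.Int.mod m 1 = 0 := by
        rw [PySem.Int.mod_eq_emod_of_pos (by omega)]; simp
      simp only [zero_add, hq, hr]; ring
    · rw [if_neg h2, if_neg (by omega : ¬ m ≤ (k.toNat : Int))]
      have hk : (k.toNat : Int) = k := by omega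
      rw [hk]; ring

-- ===== VERDICT (by name: the statement is the Claim_ definition above) =====
theorem sum_large_number_spec : Claim_equal_sum_large_number := by
  intro nl m k _hdom hpre
  obtain ⟨hm, _, _⟩ := hpre
  unfold Spec_sum_large_number sum_large_number
  simp only
  rw [pvOuterA_spec _ _ _ _ _ _ hm (le_refl _), alt_eq_F nl m k hm]
  ring
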